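-- pv_equiv track=rewrite | github.com/HatchGameEngine/HatchGameEngine | tools/abc.py | lnstyle
-- ===== SOURCE A (Python) =====
-- from typing import Literal
--
-- def lnstyle(input: str) -> Literal['\n', '\r\n', '\r']:
-- 	i: int = 0
-- 	maybemac: bool = False
-- 	input_sz: int = len(input)
-- 	while i < input_sz:
-- 		if input[i] == '\n':
-- 			return '\n' if not maybemac else '\r\n'
-- 		elif maybemac: # previous was \r and current isn't \n so...
-- 			return '\r'
-- 		elif input[i] == '\r': # wasn't already maybemac so note that
-- 			maybemac = True
-- 		else: # all other characters reset the check
-- 			maybemac = False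
-- 		i += 1
-- 	raise Exception('no line endings found! this cannot be sorted')
-- ===== SOURCE B (Python) =====
-- def lnstyle(input: str) -> str:
--     # Locate the first occurrence of each line-ending character directly.
--     n = input.find('\n')
--     r = input.find('\r')
--     if n != -1 and (r == -1 or n < r):
--         return '\n'
--     if r != -1 and r + 1 < len(input):
--         return '\r\n' if input[r + 1] == '\n' else '\r'
--     raise Exception('no line endings found! this cannot be sorted')
-- ===== Notes on version B (the rewrite author's own statement) =====
-- stated objective: simpler
-- what changed: Replaces A's character-by-character state-machine loop (maybemac flag) with two str.find calls and a single index comparison plus one lookahead character test.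
import Mathlib
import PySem

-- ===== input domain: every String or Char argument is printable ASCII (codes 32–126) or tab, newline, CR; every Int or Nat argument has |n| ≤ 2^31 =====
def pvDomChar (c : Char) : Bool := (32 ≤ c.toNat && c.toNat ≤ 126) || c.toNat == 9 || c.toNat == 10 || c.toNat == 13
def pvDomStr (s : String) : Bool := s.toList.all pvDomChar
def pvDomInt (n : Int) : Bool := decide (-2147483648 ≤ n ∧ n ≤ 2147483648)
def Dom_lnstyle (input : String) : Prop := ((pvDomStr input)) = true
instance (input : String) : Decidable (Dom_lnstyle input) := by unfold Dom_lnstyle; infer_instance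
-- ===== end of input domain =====

-- B detects the first line-ending style with two find calls and one lookahead test instead of A's
-- character-by-character state-machine loop (objective: simpler).

-- ===== PORT A =====
-- A's while loop over index i with the maybemac flag, as structural recursion over the
-- remaining characters carrying the same flag; "" marks the raise (excluded by Pre_).
def lnstyleGo : List Char → Bool → String
  | [], _ => ""
  | c :: rest, maybemac =>
    if c = '\n' then (if !maybemac then "\n" else "\r\n")
    else if maybemac then "\r"
    else if c = '\r' then lnstyleGo rest true
    else lnstyleGo rest false

def lnstyle (input : String) : String := lnstyleGo input.toList false

-- ===== PORT B =====
def lnstyle_alt (input : String) : String :=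
  let n := PySem.Str.find input "\n"
  let r := PySem.Str.find input "\r"
  if n ≠ -1 ∧ (r = -1 ∨ n < r) then "\n"
  else if r ≠ -1 ∧ r + 1 < (PySem.Str.len input : Int) then
    (if PySem.Str.pyGet? input (r + 1) = some '\n' then "\r\n" else "\r")
  else ""

-- ===== PRECONDITION & SPEC =====
-- Pre_ excludes exactly the inputs on which A raises its Exception: strings containing no
-- '\n' and containing no '\r' before the last character (a lone trailing '\r' raises too).
def Pre_lnstyle (input : String) : Prop :=
  '\n' ∈ input.toList ∨ '\r' ∈ input.toList.dropLast
instance (input : String) : Decidable (Pre_lnstyle input) := by unfold Pre_lnstyle; infer_instance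

def pvWitness_lnstyle : String := "ab\r\ncd"

def Spec_lnstyle (input : String) (out : String) : Prop := out = lnstyle_alt input
instance (input : String) (out : String) : Decidable (Spec_lnstyle input out) := by unfold Spec_lnstyle; infer_instance

-- ===== CLAIM (what is proved, stated in full; the proofs are below) =====
def Claim_equal_lnstyle : Prop := ∀ (input : String), Dom_lnstyle input → Pre_lnstyle input → Spec_lnstyle input (lnstyle input)

-- ===== LEMMAS AND PROOFS =====

-- find.go never returns a value below its starting offset (other than -1).
theorem pv_go_lb (sub cs : List Char) (k : Nat) :
    PySem.Chars.find.go sub cs k = -1 ∨ (k : Int) ≤ PySem.Chars.find.go sub cs k := by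
  induction cs generalizing k with
  | nil => simp only [PySem.Chars.find.go]; split_ifs <;> omega
  | cons c rest ih =>
    simp only [PySem.Chars.find.go]
    split_ifs with h
    · omega
    · rcases ih (k+1) with h1 | h1
      · left; exact h1
      · right; omega

-- find.go at offset k is find.go at offset 0, shifted (unless the pattern is absent).
theorem pv_go_shift (sub cs : List Char) (k : Nat) :
    PySem.Chars.find.go sub cs k =
      (if PySem.Chars.find.go sub cs 0 = -1 then -1 else PySem.Chars.find.go sub cs 0 + k) := by
  induction cs generalizing k with
  | nil =>
    simp only [PySem.Chars.find.go]
    split_ifs <;> omega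
  | cons c rest ih =>
    simp only [PySem.Chars.find.go]
    by_cases h : sub.isPrefixOf (c :: rest) = true
    · rw [if_pos h, if_pos h]; split_ifs <;> omega
    · rw [if_neg h, if_neg h, ih (k+1), ih (0+1)]
      rcases pv_go_lb sub rest 0 with h1 | h1 <;> split_ifs <;> omega

theorem pv_find_nil (x : Char) : PySem.Chars.find [] [x] = -1 := by
  simp [PySem.Chars.find, PySem.Chars.find.go]

-- find on a cons cell, for a one-character pattern.
theorem pv_find_cons (c : Char) (cs : List Char) (x : Char) :
    PySem.Chars.find (c :: cs) [x] =
      (if c = x then 0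
       else if PySem.Chars.find cs [x] = -1 then -1 else PySem.Chars.find cs [x] + 1) := by
  simp only [PySem.Chars.find, PySem.Chars.find.go]
  by_cases h : c = x
  · subst h; simp [List.isPrefixOf]
  · have hp : ([x].isPrefixOf (c :: cs)) = false := by
      simp [List.isPrefixOf]
      exact fun he => h he.symm
    rw [if_neg (by simp [hp]), if_neg h, pv_go_shift [x] cs (0+1)]
    rcases pv_go_lb [x] cs 0 with h1 | h1 <;> split_ifs <;> omega

-- find is -1 or a valid nonnegative index into the list.
theorem pv_find_range (cs : List Char) (x : Char) :
    PySem.Chars.find cs [x] = -1 ∨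
      (0 ≤ PySem.Chars.find cs [x] ∧ PySem.Chars.find cs [x] < (cs.length : Int)) := by
  induction cs with
  | nil => left; exact pv_find_nil x
  | cons c rest ih =>
    rw [pv_find_cons]
    split_ifs with h1 h2
    · right; constructor <;> simp
    · left; rfl
    · right
      rcases ih with h | ⟨h0, hl⟩
      · exact absurd h h2
      · refine ⟨by omega, ?_⟩
        simp only [List.length_cons]; push_cast; omega

-- The list-level form of B.
def pvAlt (cs : List Char) : String :=
  let n := PySem.Chars.find cs ['\n']
  let r := PySem.Chars.find cs ['\r']
  if n ≠ -1 ∧ (r = -1 ∨ n < r) then "\n"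
  else if r ≠ -1 ∧ r + 1 < (cs.length : Int) then
    (if cs[(r + 1).toNat]? = some '\n' then "\r\n" else "\r")
  else ""

theorem pv_alt_eq (input : String) : lnstyle_alt input = pvAlt input.toList := by
  unfold lnstyle_alt pvAlt
  simp only [PySem.Str.find_eq, PySem.Str.len_eq,
    show ("\n".toList) = ['\n'] from rfl, show ("\r".toList) = ['\r'] from rfl]
  rcases pv_find_range input.toList '\r' with h | ⟨h0, _⟩
  · rw [h]
    split_ifs <;> simp_all
  · have he : PySem.Str.pyGet? input (PySem.Chars.find input.toList ['\r'] + 1)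
        = input.toList[(PySem.Chars.find input.toList ['\r'] + 1).toNat]? := by
      conv_lhs => rw [show PySem.Chars.find input.toList ['\r'] + 1
            = (((PySem.Chars.find input.toList ['\r'] + 1).toNat : Nat) : Int) by omega,
          PySem.Str.pyGet?_natCast]
    rw [he]

-- One step of A's loop with the flag clear.
theorem pv_go_false_cons (c : Char) (rest : List Char) :
    lnstyleGo (c :: rest) false =
      (if c = '\n' then "\n"
       else if c = '\r' then lnstyleGo rest true else lnstyleGo rest false) := by
  simp [lnstyleGo]

-- A's loop with the flag set is decided by the next character alone.
theorem pv_go_true (cs : List Char) :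
    lnstyleGo cs true = (match cs with
      | [] => ""
      | d :: _ => if d = '\n' then "\r\n" else "\r") := by
  cases cs with
  | nil => rfl
  | cons d rest => by_cases hd : d = '\n' <;> simp [lnstyleGo, hd]

-- Main equivalence, on the list side (it covers the raise case too: both sides give "").
theorem pv_main (cs : List Char) : lnstyleGo cs false = pvAlt cs := by
  induction cs with
  | nil => simp [lnstyleGo, pvAlt, pv_find_nil]
  | cons c rest ih =>
    rw [pv_go_false_cons]
    by_cases hn : c = '\n'
    · subst hn
      rw [if_pos rfl]
      unfold pvAlt
      rw [pv_find_cons, pv_find_cons]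
      rw [if_pos rfl, if_neg (show ('\n':Char) ≠ '\r' by decide)]
      rcases pv_find_range rest '\r' with h | ⟨h0, _⟩
      · simp [h]
      · rw [if_neg (by omega : ¬ PySem.Chars.find rest ['\r'] = -1)]
        rw [if_pos ⟨by omega, Or.inr (by omega)⟩]
    · rw [if_neg hn]
      by_cases hr : c = '\r'
      · subst hr
        rw [if_pos rfl, pv_go_true]
        unfold pvAlt
        rw [pv_find_cons, pv_find_cons]
        rw [if_neg (show ('\r':Char) ≠ '\n' by decide), if_pos rfl]
        cases rest with
        | nil =>
          rw [pv_find_nil]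
          norm_num
        | cons d rest' =>
          have hlen : ((0:Int) + 1) < (((d :: rest').length + 1 : Nat) : Int) := by
            push_cast; simp
          rcases pv_find_range (d :: rest') '\n' with h | ⟨h0, _⟩
          · rw [h, if_pos rfl]
            rw [if_neg (by norm_num : ¬ ((-1:Int) ≠ -1 ∧ ((0:Int) = -1 ∨ (-1:Int) < 0)))]
            rw [if_pos (show (0:Int) ≠ -1 ∧ (0:Int) + 1 < ((('\r' :: d :: rest').length : Nat) : Int) by
              refine ⟨by decide, ?_⟩; simp only [List.length_cons]; push_cast; omega)]
            simp
          · rw [if_neg (by omega : ¬ PySem.Chars.find (d :: rest') ['\n'] = -1)]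
            rw [if_neg (show ¬ ((PySem.Chars.find (d :: rest') ['\n'] + 1) ≠ -1 ∧
                ((0:Int) = -1 ∨ PySem.Chars.find (d :: rest') ['\n'] + 1 < 0)) by
              push_neg; intro _; exact ⟨by omega, by omega⟩)]
            rw [if_pos (show (0:Int) ≠ -1 ∧ (0:Int) + 1 < ((('\r' :: d :: rest').length : Nat) : Int) by
              refine ⟨by decide, ?_⟩; simp only [List.length_cons]; push_cast; omega)]
            simp
      · rw [if_neg hr, ih]
        unfold pvAlt
        rw [pv_find_cons, pv_find_cons, if_neg hn, if_neg hr]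
        set n := PySem.Chars.find rest ['\n'] with hndef
        set r := PySem.Chars.find rest ['\r'] with hrdef
        rcases pv_find_range rest '\n' with hN | ⟨hN0, hNl⟩ <;>
          rcases pv_find_range rest '\r' with hR | ⟨hR0, hRl⟩ <;>
          rw [← hndef] at * <;> rw [← hrdef] at *
        · simp [hN, hR]
        · rw [hN, if_pos rfl, if_neg (by omega : ¬ r = -1)]
          rw [if_neg (by norm_num : ¬ ((-1:Int) ≠ -1 ∧ ((r + 1) = -1 ∨ (-1:Int) < r + 1))),
              if_neg (by norm_num : ¬ ((-1:Int) ≠ -1 ∧ (r = -1 ∨ (-1:Int) < r)))]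
          by_cases hb : r + 1 < (rest.length : Int)
          · rw [if_pos (show (r+1) ≠ -1 ∧ (r+1)+1 < ((c :: rest).length : Int) by
                refine ⟨by omega, ?_⟩; simp only [List.length_cons]; push_cast; omega),
              if_pos (⟨by omega, hb⟩ : r ≠ -1 ∧ r + 1 < (rest.length : Int))]
            have hidx : (c :: rest)[(r + 1 + 1).toNat]? = rest[(r + 1).toNat]? := by
              rw [show (r + 1 + 1).toNat = (r + 1).toNat + 1 by omega]; simp
            rw [hidx]
          · rw [if_neg (show ¬ ((r+1) ≠ -1 ∧ (r+1)+1 < ((c :: rest).length : Int)) by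
                simp only [List.length_cons]; push_neg; intro _; push_cast; omega),
              if_neg (show ¬ (r ≠ -1 ∧ r + 1 < (rest.length : Int)) by push_neg; intro _; omega)]
        · rw [hR, if_pos rfl, if_neg (by omega : ¬ n = -1)]
          rw [if_pos (⟨by omega, Or.inl rfl⟩ : (n+1) ≠ -1 ∧ ((-1:Int) = -1 ∨ n + 1 < -1)),
              if_pos (⟨by omega, Or.inl rfl⟩ : n ≠ -1 ∧ ((-1:Int) = -1 ∨ n < -1))]
        · rw [if_neg (by omega : ¬ n = -1), if_neg (by omega : ¬ r = -1)]
          by_cases hb : n < r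
          · rw [if_pos (⟨by omega, Or.inr (by omega)⟩ : (n+1) ≠ -1 ∧ ((r+1) = -1 ∨ n + 1 < r + 1)),
                if_pos (⟨by omega, Or.inr hb⟩ : n ≠ -1 ∧ (r = -1 ∨ n < r))]
          · rw [if_neg (show ¬ ((n+1) ≠ -1 ∧ ((r+1) = -1 ∨ n + 1 < r + 1)) by
                push_neg; intro _; exact ⟨by omega, by omega⟩),
              if_neg (show ¬ (n ≠ -1 ∧ (r = -1 ∨ n < r)) by
                push_neg; intro _; exact ⟨by omega, by omega⟩)]
            by_cases hs : r + 1 < (rest.length : Int)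
            · rw [if_pos (show (r+1) ≠ -1 ∧ (r+1)+1 < ((c :: rest).length : Int) by
                  refine ⟨by omega, ?_⟩; simp only [List.length_cons]; push_cast; omega),
                if_pos (⟨by omega, hs⟩ : r ≠ -1 ∧ r + 1 < (rest.length : Int))]
              have hidx : (c :: rest)[(r + 1 + 1).toNat]? = rest[(r + 1).toNat]? := by
                rw [show (r + 1 + 1).toNat = (r + 1).toNat + 1 by omega]; simp
              rw [hidx]
            · rw [if_neg (show ¬ ((r+1) ≠ -1 ∧ (r+1)+1 < ((c :: rest).length : Int)) by
                  simp only [List.length_cons]; push_neg; intro _; push_cast; omega),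
                if_neg (show ¬ (r ≠ -1 ∧ r + 1 < (rest.length : Int)) by push_neg; intro _; omega)]

-- ===== VERDICT (by name: the statement is the Claim_ definition above) =====
theorem lnstyle_spec : Claim_equal_lnstyle := by
  intro input _ _
  unfold Spec_lnstyle lnstyle
  rw [pv_alt_eq, pv_main]
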